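-- pv_equiv track=rewrite | github.com/Siddhesh25082001/Infytq-Preparation | Practice Problems/Level-1/6.py | list123
-- ===== SOURCE A (Python) =====
-- def list123(nums):
--
--     #start writing your code here
--     flag = False
--
--     for num in range(0, len(nums) - 2):
--         if nums[num] == 1 and nums[num + 1] == 2 and nums[num + 2] == 3:
--             flag = True
--             return True
--         else:
--             continue
--
--     if not flag: return False
-- ===== SOURCE B (Python) =====
-- def list123(nums):
--     # streaming finite-state scan: progress in {0,1,2} = how much of 1,2,3 matched
--     progress = 0
--     for x in nums:
--         if progress == 2 and x == 3:
--             return True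
--         if progress == 1 and x == 2:
--             progress = 2
--         else:
--             progress = 1 if x == 1 else 0
--     return False
-- ===== Notes on version B (the rewrite author's own statement) =====
-- stated objective: alternative
-- what changed: Replaces the look-ahead windowed index scan (nums[i],nums[i+1],nums[i+2] for each i) with a single streaming finite-state scan over the elements that tracks matched progress of 1,2,3 with overlap-aware resets.
import Mathlib
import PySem

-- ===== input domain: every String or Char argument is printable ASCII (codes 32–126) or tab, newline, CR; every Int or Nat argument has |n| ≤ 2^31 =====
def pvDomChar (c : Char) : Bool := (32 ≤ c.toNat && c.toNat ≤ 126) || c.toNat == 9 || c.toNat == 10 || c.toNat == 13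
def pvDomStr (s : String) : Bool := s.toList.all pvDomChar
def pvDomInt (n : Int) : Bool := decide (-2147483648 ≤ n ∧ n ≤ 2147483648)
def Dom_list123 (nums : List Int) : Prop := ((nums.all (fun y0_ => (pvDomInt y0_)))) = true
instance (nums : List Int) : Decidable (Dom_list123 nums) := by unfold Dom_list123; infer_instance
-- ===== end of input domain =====

-- B replaces A's look-ahead windowed index scan with a streaming finite-state scan; same O(n) cost.

-- ===== PORT A =====
-- the 'for num in range(0, len(nums)-2)' loop with early return
def list123Go (nums : List Int) : List Int → Bool
  | [] => false
  | i :: rest =>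
    if (PySem.List.pyGet? nums i == some 1 && PySem.List.pyGet? nums (i + 1) == some 2
        && PySem.List.pyGet? nums (i + 2) == some 3) then
      true
    else
      list123Go nums rest

def list123 (nums : List Int) : Bool :=
  list123Go nums (PySem.List.pyRange 0 ((nums.length : Int) - 2) 1)

-- ===== PORT B =====
-- the streaming loop: progress ∈ {0,1,2} = how much of 1,2,3 is currently matched
def list123AltGo (progress : Int) : List Int → Bool
  | [] => false
  | x :: rest =>
    if progress == 2 && x == 3 then true
    else if progress == 1 && x == 2 then list123AltGo 2 rest
    else list123AltGo (if x == 1 then 1 else 0) rest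

def list123_alt (nums : List Int) : Bool := list123AltGo 0 nums

-- ===== PRECONDITION & SPEC =====
def Spec_list123 (nums : List Int) (out : Bool) : Prop := out = list123_alt nums
instance (nums : List Int) (out : Bool) : Decidable (Spec_list123 nums out) := by unfold Spec_list123; infer_instance

-- ===== CLAIM (what is proved, stated in full; the proofs are below) =====
def Claim_equal_list123 : Prop := ∀ (nums : List Int), Dom_list123 nums → Spec_list123 nums (list123 nums)

-- ===== LEMMAS AND PROOFS =====

-- reference predicate: some window of three consecutive elements is 1,2,3
def has123 : List Int → Bool
  | x :: y :: z :: rest => (x == 1 && y == 2 && z == 3) || has123 (y :: z :: rest)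
  | _ => false

def starts3 : List Int → Bool
  | z :: _ => z == 3
  | [] => false

def starts23 : List Int → Bool
  | y :: z :: _ => y == 2 && z == 3
  | _ => false

theorem has123_cons (x : Int) (rest : List Int) :
    has123 (x :: rest) = ((x == 1 && starts23 rest) || has123 rest) := by
  rcases rest with _ | ⟨y, _ | ⟨z, r⟩⟩ <;> simp [has123, starts23, Bool.and_assoc]

theorem starts23_cons (x : Int) (rest : List Int) :
    starts23 (x :: rest) = (x == 2 && starts3 rest) := by
  rcases rest with _ | ⟨z, r⟩ <;> simp [starts23, starts3]

theorem altGo_char (l : List Int) :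
    list123AltGo 0 l = has123 l ∧
    list123AltGo 1 l = (starts23 l || has123 l) ∧
    list123AltGo 2 l = (starts3 l || has123 l) := by
  induction l with
  | nil => simp [list123AltGo, has123, starts23, starts3]
  | cons x rest ih =>
    obtain ⟨ih0, ih1, ih2⟩ := ih
    refine ⟨?_, ?_, ?_⟩
    · rw [has123_cons]
      by_cases hx : x = 1 <;> simp [list123AltGo, hx, ih0, ih1]
    · rw [starts23_cons, has123_cons]
      by_cases hx2 : x = 2
      · simp [list123AltGo, hx2, ih2]
      · have hb2 : (x == 2) = false := by simp [hx2]
        by_cases hx1 : x = 1 <;>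
          simp [list123AltGo, hx1, hb2, ih0, ih1]
    · rw [has123_cons]
      by_cases hx3 : x = 3
      · simp [list123AltGo, hx3, starts3]
      · have hb3 : (x == 3) = false := by simp [hx3]
        by_cases hx1 : x = 1 <;>
          simp [list123AltGo, hb3, hx1, ih0, ih1, starts3]

theorem list123_alt_eq_has123 (nums : List Int) : list123_alt nums = has123 nums :=
  (altGo_char nums).1

theorem has123_short (l : List Int) (h : l.length < 3) : has123 l = false := by
  rcases l with _ | ⟨x, _ | ⟨y, _ | ⟨z, r⟩⟩⟩
  · simp [has123]
  · simp [has123]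
  · simp [has123]
  · simp at h; omega

theorem goA_char (l pre : List Int) :
    list123Go (pre ++ l) (PySem.List.pyRange (pre.length : Int)
      ((pre.length : Int) + (l.length : Int) - 2) 1) = has123 l := by
  induction l generalizing pre with
  | nil =>
    rw [PySem.List.pyRange_one_eq_nil (by simp)]
    simp [list123Go, has123]
  | cons x rest ih =>
    by_cases h : (rest.length : Int) < 2
    · rw [PySem.List.pyRange_one_eq_nil (by simp; omega)]
      simp only [list123Go]
      exact (has123_short (x :: rest) (by simp at h ⊢; omega)).symm
    · rw [PySem.List.pyRange_one_cons (by simp; omega)]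
      rw [list123Go]
      have h0 : PySem.List.pyGet? (pre ++ x :: rest) (pre.length : Int) = some x :=
        PySem.List.pyGet?_append_length pre rest x
      have h1 : PySem.List.pyGet? (pre ++ x :: rest) ((pre.length : Int) + 1) = rest[0]? := by
        have := PySem.List.pyGet?_append_right (pre := pre) (ys := x :: rest) (k := 1)
        simpa using this
      have h2 : PySem.List.pyGet? (pre ++ x :: rest) ((pre.length : Int) + 2) = rest[1]? := by
        have := PySem.List.pyGet?_append_right (pre := pre) (ys := x :: rest) (k := 2)
        simpa using this
      have hrec : list123Go (pre ++ x :: rest)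
          (PySem.List.pyRange ((pre.length : Int) + 1)
            ((pre.length : Int) + ((x :: rest).length : Int) - 2) 1) = has123 rest := by
        have hthis := ih (pre ++ [x])
        have e1 : ((pre ++ [x]).length : Int) = (pre.length : Int) + 1 := by simp
        have e2 : (pre ++ [x]) ++ rest = pre ++ x :: rest := by simp
        rw [e1, e2] at hthis
        have e3 : (pre.length : Int) + ((x :: rest).length : Int) - 2
            = (pre.length : Int) + 1 + (rest.length : Int) - 2 := by
          push_cast [List.length_cons]; ring
        rw [e3]
        exact hthis
      rw [h0, h1, h2]
      rcases rest with _ | ⟨y, _ | ⟨z, r⟩⟩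
      · simp at h
      · simp at h
      · rw [hrec]
        cases hb1 : (x == 1) <;> cases hb2 : (y == 2) <;> cases hb3 : (z == 3) <;>
          simp [has123, hb1, hb2, hb3]

-- ===== VERDICT (by name: the statement is the Claim_ definition above) =====
theorem list123_spec : Claim_equal_list123 := by
  intro nums _
  unfold Spec_list123
  rw [list123_alt_eq_has123]
  have := goA_char nums []
  simpa [list123] using this
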